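-- pv_equiv track=rewrite | github.com/AlizainB333/Projects | AI/mp06/submitted.py | calculate_mst_length
-- ===== SOURCE A (Python) =====
-- def chebyshev_distance(a, b):
--     return max(abs(a[0] - b[0]), abs(a[1] - b[1]))
--
-- class UnionFind:
--     def __init__(self, size):
--         self.parent = [i for i in range(size)]
--
--     def find(self, x):
--         if self.parent[x] != x:
--             self.parent[x] = self.find(self.parent[x])
--         return self.parent[x]
--
--     def union(self, x, y):
--         root_x = self.find(x)
--         root_y = self.find(y)
--         self.parent[root_x] = root_y
--
-- def calculate_mst_length(waypoints):
--     waypoints_list = list(waypoints)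
--     edges = []
--
--     # Create a list of edges with weights
--     for i in range(len(waypoints_list)):
--         for j in range(i + 1, len(waypoints_list)):
--             edges.append((i, j, chebyshev_distance(waypoints_list[i], waypoints_list[j])))
--
--     # Sort edges by weight
--     edges.sort(key=lambda x: x[2])
--
--     # Initialize Union-Find data structure
--     uf = UnionFind(len(waypoints_list))
--
--     mst_length = 0
--
--     # Iterate over sorted edges and add to MST
--     for edge in edges:
--         u, v, weight = edge
--         if uf.find(u) != uf.find(v):
--             uf.union(u, v)
--             mst_length += weight
--
--     return mst_length
-- ===== SOURCE B (Python) =====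
-- def calculate_mst_length(waypoints):
--     pts = list(waypoints)
--     n = len(pts)
--
--     # Weight-first edge tuples, same stable order by weight as A's key-sort.
--     edges = sorted(
--         ((max(abs(pts[i][0] - pts[j][0]), abs(pts[i][1] - pts[j][1])), i, j)
--          for i in range(n) for j in range(i + 1, n)),
--         key=lambda e: e[0])
--
--     # Flat component labels instead of a union-find forest: merging two
--     # components relabels one of them wholesale; no recursion, no class.
--     comp = list(range(n))
--     total = 0
--     for w, i, j in edges:
--         ci, cj = comp[i], comp[j]
--         if ci != cj:
--             comp = [cj if c == ci else c for c in comp]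
--             total += w
--     return total
-- ===== Notes on version B (the rewrite author's own statement) =====
-- stated objective: alternative
-- what changed: The recursive union-find forest with path compression is replaced by a flat component-label array that is relabelled wholesale on each merge (no class, no recursion), and the edge list is built as weight-first tuples by a comprehension instead of nested index loops appending (i,j,w) triples.
import Mathlib
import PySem

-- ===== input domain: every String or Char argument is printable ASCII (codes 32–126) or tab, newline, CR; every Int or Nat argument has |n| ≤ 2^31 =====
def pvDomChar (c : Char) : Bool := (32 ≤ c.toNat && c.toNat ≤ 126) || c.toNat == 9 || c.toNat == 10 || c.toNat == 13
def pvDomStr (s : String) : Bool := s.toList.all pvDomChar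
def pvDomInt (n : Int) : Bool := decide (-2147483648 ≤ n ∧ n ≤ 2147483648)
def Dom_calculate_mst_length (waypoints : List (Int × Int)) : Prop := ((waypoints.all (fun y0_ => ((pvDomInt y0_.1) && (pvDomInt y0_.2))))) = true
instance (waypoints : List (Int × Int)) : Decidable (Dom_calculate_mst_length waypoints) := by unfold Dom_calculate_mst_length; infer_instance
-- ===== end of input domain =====

-- B replaces A's recursive union-find forest by a flat component-label list relabelled on
-- each merge, and builds weight-first edge tuples by a comprehension (objective: alternative).

-- ===== PORT A =====
def pvCheb (a b : Int × Int) : Int := max |a.1 - b.1| |a.2 - b.2|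

-- for i in range(n): for j in range(i+1, n): edges.append((i, j, cheb(w[i], w[j])))
def pvEdgesA (pts : List (Int × Int)) : List (Int × Int × Int) :=
  (PySem.List.pyRange 0 (pts.length : Int) 1).foldl (fun acc i =>
    (PySem.List.pyRange (i + 1) (pts.length : Int) 1).foldl (fun acc2 j =>
      acc2 ++ [(i, j, pvCheb (PySem.List.pyGetD pts i (0, 0)) (PySem.List.pyGetD pts j (0, 0)))]) acc) []

-- UnionFind.find with path compression; fuel makes the recursion structural (the proofs
-- show fuel 2^n is always sufficient, so the 0-fuel branch is never taken on A's calls).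
def pvFind (parent : List Int) (x : Int) : Nat → List Int × Int
  | 0 => (parent, x)
  | f + 1 =>
    let px := PySem.List.pyGetD parent x 0
    if px ≠ x then
      let pr := pvFind parent px f
      let p2 := PySem.List.pySetD pr.1 x pr.2     -- self.parent[x] = self.find(self.parent[x])
      (p2, PySem.List.pyGetD p2 x 0)              -- return self.parent[x]
    else (parent, x)

-- UnionFind.union
def pvUnion (parent : List Int) (x y : Int) (fuel : Nat) : List Int :=
  let r1 := pvFind parent x fuel
  let r2 := pvFind r1.1 y fuel
  PySem.List.pySetD r2.1 r1.2 r2.2                -- self.parent[root_x] = root_y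

-- body of A's loop over sorted edges
def pvStepA (fuel : Nat) (st : List Int × Int) (e : Int × Int × Int) : List Int × Int :=
  let f1 := pvFind st.1 e.1 fuel
  let f2 := pvFind f1.1 e.2.1 fuel
  if f1.2 ≠ f2.2 then (pvUnion f2.1 e.1 e.2.1 fuel, st.2 + e.2.2)
  else (f2.1, st.2)

def calculate_mst_length (waypoints : List (Int × Int)) : Int :=
  let edges := PySem.List.sorted (pvEdgesA waypoints) (fun x => x.2.2)
  let parent0 := PySem.List.pyRange 0 (waypoints.length : Int) 1
  (edges.foldl (pvStepA (2 ^ waypoints.length)) (parent0, 0)).2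

-- ===== PORT B =====
-- ((w, i, j) for i in range(n) for j in range(i+1, n)) with w the Chebyshev distance
def pvEdgesB (pts : List (Int × Int)) : List (Int × Int × Int) :=
  (PySem.List.pyRange 0 (pts.length : Int) 1).flatMap (fun i =>
    (PySem.List.pyRange (i + 1) (pts.length : Int) 1).map (fun j =>
      (max |(PySem.List.pyGetD pts i (0, 0)).1 - (PySem.List.pyGetD pts j (0, 0)).1|
           |(PySem.List.pyGetD pts i (0, 0)).2 - (PySem.List.pyGetD pts j (0, 0)).2|, i, j)))

-- body of B's loop: flat component labels, wholesale relabel on merge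
def pvStepB (st : List Int × Int) (e : Int × Int × Int) : List Int × Int :=
  let ci := PySem.List.pyGetD st.1 e.2.1 0
  let cj := PySem.List.pyGetD st.1 e.2.2 0
  if ci ≠ cj then (st.1.map (fun c => if c = ci then cj else c), st.2 + e.1)
  else (st.1, st.2)

def calculate_mst_length_alt (waypoints : List (Int × Int)) : Int :=
  let edges := PySem.List.sorted (pvEdgesB waypoints) (fun e => e.1)
  let comp0 := PySem.List.pyRange 0 (waypoints.length : Int) 1
  (edges.foldl pvStepB (comp0, 0)).2

-- ===== PRECONDITION & SPEC =====
def Spec_calculate_mst_length (waypoints : List (Int × Int)) (out : Int) : Prop := out = calculate_mst_length_alt waypoints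
instance (waypoints : List (Int × Int)) (out : Int) : Decidable (Spec_calculate_mst_length waypoints out) := by unfold Spec_calculate_mst_length; infer_instance

-- ===== CLAIM (what is proved, stated in full; the proofs are below) =====
def Claim_equal_calculate_mst_length : Prop := ∀ (waypoints : List (Int × Int)), Dom_calculate_mst_length waypoints → Spec_calculate_mst_length waypoints (calculate_mst_length waypoints)

-- ===== LEMMAS AND PROOFS =====

-- (w, i, j) from (i, j, w)
def pvRot (e : Int × Int × Int) : Int × Int × Int := (e.2.2, e.1, e.2.1)

theorem pvEdgesB_eq_map (pts : List (Int × Int)) : pvEdgesB pts = (pvEdgesA pts).map pvRot := by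
  have h1 : pvEdgesA pts = List.flatMap (fun i =>
      List.map (fun j => (i, j, pvCheb (PySem.List.pyGetD pts i (0, 0)) (PySem.List.pyGetD pts j (0, 0))))
        (PySem.List.pyRange (i + 1) (pts.length : Int))) (PySem.List.pyRange 0 (pts.length : Int)) := by
    unfold pvEdgesA
    simp only [PySem.List.foldl_append_singleton_eq_map]
    rw [PySem.List.foldl_append_eq_flatMap]
    simp
  rw [h1, List.map_flatMap]
  unfold pvEdgesB
  apply congrArg (List.flatMap · (PySem.List.pyRange 0 (pts.length : Int)))
  funext i
  rw [List.map_map]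
  apply congrArg (List.map · (PySem.List.pyRange (i + 1) (pts.length : Int)))
  funext j
  simp [pvRot, pvCheb]

theorem pvInsertBy_map {α β κ : Type} [LT κ] [DecidableLT κ] (g : α → β) (k : β → κ) (x : α)
    (acc : List α) :
    PySem.List.insertBy (fun a b => decide (k a < k b)) (g x) (acc.map g)
      = (PySem.List.insertBy (fun a b => decide (k (g a) < k (g b))) x acc).map g := by
  induction acc with
  | nil => simp [PySem.List.insertBy]
  | cons y ys ih =>
    simp only [List.map_cons, PySem.List.insertBy]
    split_ifs <;> simp_all

theorem pvFoldl_insertBy_map {α β κ : Type} [LT κ] [DecidableLT κ] (g : α → β) (k : β → κ)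
    (l : List α) : ∀ (acc : List α),
    l.foldl (fun acc x => PySem.List.insertBy (fun a b => decide (k a < k b)) (g x) acc) (acc.map g)
      = (l.foldl (fun acc x => PySem.List.insertBy (fun a b => decide (k (g a) < k (g b))) x acc) acc).map g := by
  induction l with
  | nil => intro acc; simp
  | cons e l ih =>
    intro acc
    rw [List.foldl_cons, List.foldl_cons, pvInsertBy_map g k e acc]
    exact ih _

theorem pvSorted_map_comm {α β κ : Type} [LT κ] [DecidableLT κ] (g : α → β) (k : β → κ) (l : List α) :
    PySem.List.sorted (l.map g) k = (PySem.List.sorted l (fun a => k (g a))).map g := by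
  rw [PySem.List.sorted_eq_foldl_insertBy, PySem.List.sorted_eq_foldl_insertBy, List.foldl_map]
  simpa using pvFoldl_insertBy_map g k l []

theorem pvGetSet_self (l : List Int) (x v : Int) (h0 : 0 ≤ x) (h : x < (l.length : Int)) :
    PySem.List.pyGetD (PySem.List.pySetD l x v) x 0 = v := by
  have hx : x = ((x.toNat : Nat) : Int) := by omega
  rw [hx, PySem.List.pyGetD_pySetD_natCast l x.toNat x.toNat v 0 (by omega)]
  simp

theorem pvGetSet_ne (l : List Int) (x y v : Int) (h0 : 0 ≤ x) (h : x < (l.length : Int))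
    (h0' : 0 ≤ y) (hn : y ≠ x) :
    PySem.List.pyGetD (PySem.List.pySetD l x v) y 0 = PySem.List.pyGetD l y 0 := by
  have hx : x = ((x.toNat : Nat) : Int) := by omega
  have hy : y = ((y.toNat : Nat) : Int) := by omega
  rw [hx, hy, PySem.List.pyGetD_pySetD_natCast l x.toNat y.toNat v 0 (by omega)]
  have : ¬ (y.toNat = x.toNat) := by omega
  simp [this]

theorem pvGet_range (n x : Int) (h0 : 0 ≤ x) (h : x < n) :
    PySem.List.pyGetD (PySem.List.pyRange 0 n) x 0 = x := by
  rw [PySem.List.pyRange_one, PySem.List.pyGetD_of_nonneg _ _ h0,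
    PySem.List.getD_map_range _ _ _ _ (by omega)]
  omega

theorem pvGet_map (f : Int → Int) (l : List Int) (z : Int) (h0 : 0 ≤ z) (h : z < (l.length : Int)) :
    PySem.List.pyGetD (l.map f) z 0 = f (PySem.List.pyGetD l z 0) := by
  rw [PySem.List.pyGetD_eq_getElem _ _ h0 (by simpa using h),
      PySem.List.pyGetD_eq_getElem _ _ h0 h]
  simp
-- number of non-root slots of the parent array
def pvNR (n : Nat) (parent : List Int) : Nat :=
  ((Finset.range n).filter (fun k : Nat => PySem.List.pyGetD parent ((k : Int)) 0 ≠ ((k : Int)))).card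

-- pointwise forest invariant: parents in range, comp constant along parent links,
-- measure m strictly decreasing towards roots, m bounded by 2^(#non-roots)
def pvInvP (n : Nat) (parent comp : List Int) (m : Int → Nat) : Prop :=
  ∀ x : Int, 0 ≤ x → x < (n : Int) →
    (0 ≤ PySem.List.pyGetD parent x 0 ∧ PySem.List.pyGetD parent x 0 < (n : Int)) ∧
    PySem.List.pyGetD comp (PySem.List.pyGetD parent x 0) 0 = PySem.List.pyGetD comp x 0 ∧
    (PySem.List.pyGetD parent x 0 = x ∨ m (PySem.List.pyGetD parent x 0) < m x) ∧
    m x + 1 ≤ 2 ^ pvNR n parent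

-- distinct roots carry distinct comp labels
def pvInj (n : Nat) (parent comp : List Int) : Prop :=
  ∀ x y : Int, 0 ≤ x → x < (n : Int) → 0 ≤ y → y < (n : Int) →
    PySem.List.pyGetD parent x 0 = x → PySem.List.pyGetD parent y 0 = y →
    PySem.List.pyGetD comp x 0 = PySem.List.pyGetD comp y 0 → x = y

def pvInv (n : Nat) (parent comp : List Int) : Prop :=
  parent.length = n ∧ comp.length = n ∧ pvInj n parent comp ∧ ∃ m, pvInvP n parent comp m

theorem pvNR_congr (n : Nat) (parent q : List Int)
    (h : ∀ y : Int, 0 ≤ y → y < (n : Int) → (PySem.List.pyGetD q y 0 = y ↔ PySem.List.pyGetD parent y 0 = y)) :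
    pvNR n q = pvNR n parent := by
  unfold pvNR
  congr 1
  apply Finset.filter_congr
  intro k hk
  simp only [Finset.mem_range] at hk
  have := h (k : Int) (by omega) (by exact_mod_cast hk)
  constructor <;> intro hne hEq <;> [exact hne (this.2 hEq); exact hne (this.1 hEq)]

theorem pvInj_congr (n : Nat) (parent q comp : List Int)
    (h : ∀ y : Int, 0 ≤ y → y < (n : Int) → (PySem.List.pyGetD q y 0 = y ↔ PySem.List.pyGetD parent y 0 = y))
    (hI : pvInj n parent comp) : pvInj n q comp := by
  intro x y hx0 hxn hy0 hyn hrx hry hc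
  exact hI x y hx0 hxn hy0 hyn ((h x hx0 hxn).1 hrx) ((h y hy0 hyn).1 hry) hc

theorem pvFind_spec (n : Nat) (comp : List Int) (m : Int → Nat) :
    ∀ (fuel : Nat) (parent : List Int) (x : Int),
    parent.length = n → pvInvP n parent comp m → 0 ≤ x → x < (n : Int) → m x < fuel →
    ∃ p' r, pvFind parent x fuel = (p', r) ∧
      p'.length = n ∧ 0 ≤ r ∧ r < (n : Int) ∧
      PySem.List.pyGetD parent r 0 = r ∧
      PySem.List.pyGetD comp r 0 = PySem.List.pyGetD comp x 0 ∧
      (r = x ∨ m r < m x) ∧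
      (∀ y : Int, 0 ≤ y → y < (n : Int) → (PySem.List.pyGetD p' y 0 = y ↔ PySem.List.pyGetD parent y 0 = y)) ∧
      pvNR n p' = pvNR n parent ∧
      pvInvP n p' comp m := by
  intro fuel
  induction fuel with
  | zero => intro parent x _ _ _ _ hf; omega
  | succ f ih =>
    intro parent x hlen hP hx0 hxn hf
    obtain ⟨hrange, hcomp, hdesc, hbnd⟩ := hP x hx0 hxn
    by_cases hpx : PySem.List.pyGetD parent x 0 = x
    · refine ⟨parent, x, ?_, hlen, hx0, hxn, hpx, rfl, Or.inl rfl, fun y _ _ => Iff.rfl, rfl, hP⟩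
      unfold pvFind
      simp [hpx]
    · have hmpx : m (PySem.List.pyGetD parent x 0) < m x := hdesc.resolve_left hpx
      obtain ⟨p1, r, heq1, hlen1, hr0, hrn, hroot, hcomp1, hdec1, hiff1, hnr1, hP1⟩ :=
        ih parent (PySem.List.pyGetD parent x 0) hlen hP hrange.1 hrange.2 (by omega)
      have hxlen : x < (p1.length : Int) := by rw [hlen1]; exact hxn
      have hgetself : PySem.List.pyGetD (PySem.List.pySetD p1 x r) x 0 = r :=
        pvGetSet_self p1 x r hx0 hxlen
      have hmr : m r < m x := by
        rcases hdec1 with h | h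
        · rw [h]; exact hmpx
        · omega
      have hrx : r ≠ x := by
        intro hc; rw [hc] at hmr; omega
      have hiff2 : ∀ y : Int, 0 ≤ y → y < (n : Int) →
          (PySem.List.pyGetD (PySem.List.pySetD p1 x r) y 0 = y ↔ PySem.List.pyGetD parent y 0 = y) := by
        intro y hy0 hyn
        by_cases hyx : y = x
        · subst hyx
          rw [hgetself]
          exact iff_of_false hrx hpx
        · rw [pvGetSet_ne p1 x y r hx0 hxlen hy0 hyx]
          exact hiff1 y hy0 hyn
      have hiff21 : ∀ y : Int, 0 ≤ y → y < (n : Int) →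
          (PySem.List.pyGetD (PySem.List.pySetD p1 x r) y 0 = y ↔ PySem.List.pyGetD p1 y 0 = y) := by
        intro y hy0 hyn
        by_cases hyx : y = x
        · subst hyx
          rw [hgetself]
          exact iff_of_false hrx (fun h => hpx ((hiff1 y hy0 hyn).1 h))
        · rw [pvGetSet_ne p1 x y r hx0 hxlen hy0 hyx]
      have hnr2 : pvNR n (PySem.List.pySetD p1 x r) = pvNR n parent := pvNR_congr n parent _ hiff2
      have hnr21 : pvNR n (PySem.List.pySetD p1 x r) = pvNR n p1 := pvNR_congr n p1 _ hiff21
      refine ⟨PySem.List.pySetD p1 x r, r, ?_, ?_, hr0, hrn, hroot, hcomp1.trans hcomp,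
        Or.inr hmr, hiff2, hnr2, ?_⟩
      · unfold pvFind
        simp only [hpx, ne_eq, not_false_eq_true, if_pos]
        rw [heq1, hgetself]
      · rw [PySem.List.length_pySetD]; exact hlen1
      · -- pvInvP for the compressed array
        intro y hy0 hyn
        by_cases hyx : y = x
        · subst hyx
          rw [hgetself]
          exact ⟨⟨hr0, hrn⟩, hcomp1.trans hcomp, Or.inr hmr, by rw [hnr2]; exact hbnd⟩
        · rw [pvGetSet_ne p1 x y r hx0 hxlen hy0 hyx]
          obtain ⟨h1, h2, h3, h4⟩ := hP1 y hy0 hyn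
          exact ⟨h1, h2, h3, by rw [hnr21]; exact h4⟩

theorem pvStep_sim (n : Nat) (parent comp : List Int) (total : Int) (e : Int × Int × Int)
    (he : 0 ≤ e.1 ∧ e.1 < (n : Int) ∧ 0 ≤ e.2.1 ∧ e.2.1 < (n : Int))
    (hInv : pvInv n parent comp) :
    ∃ parent' comp' total',
      pvStepA (2 ^ n) (parent, total) e = (parent', total') ∧
      pvStepB (comp, total) (pvRot e) = (comp', total') ∧
      pvInv n parent' comp' := by
  obtain ⟨hlenP, hlenC, hInj, m, hP⟩ := hInv
  obtain ⟨hu0, hun, hv0, hvn⟩ := he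
  have hnrle : ∀ q : List Int, pvNR n q ≤ n := by
    intro q
    calc pvNR n q ≤ (Finset.range n).card := Finset.card_filter_le _ _
    _ = n := Finset.card_range n
  have hfuel : ∀ (q : List Int) (m' : Int → Nat), pvInvP n q comp m' →
      ∀ x : Int, 0 ≤ x → x < (n : Int) → m' x < 2 ^ n := by
    intro q m' hPq x hx0 hxn
    have h1 := (hPq x hx0 hxn).2.2.2
    have h2 : (2:Nat) ^ pvNR n q ≤ 2 ^ n := Nat.pow_le_pow_right (by omega) (hnrle q)
    omega
  obtain ⟨p1, ru, heq1, hlen1, hru0, hrun, hruroot, hrucomp, _, hiff1, hnr1, hP1⟩ :=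
    pvFind_spec n comp m (2 ^ n) parent e.1 hlenP hP hu0 hun (hfuel parent m hP e.1 hu0 hun)
  obtain ⟨p2, rv, heq2, hlen2, hrv0, hrvn, hrvroot1, hrvcomp, _, hiff2, hnr2, hP2⟩ :=
    pvFind_spec n comp m (2 ^ n) p1 e.2.1 hlen1 hP1 hv0 hvn (hfuel p1 m hP1 e.2.1 hv0 hvn)
  -- roots transfer back to the original parent array
  have hrvroot : PySem.List.pyGetD parent rv 0 = rv := (hiff1 rv hrv0 hrvn).1 hrvroot1
  have hkey : ru = rv ↔ PySem.List.pyGetD comp e.1 0 = PySem.List.pyGetD comp e.2.1 0 := by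
    constructor
    · intro h; rw [← hrucomp, ← hrvcomp, h]
    · intro h
      exact hInj ru rv hru0 hrun hrv0 hrvn hruroot hrvroot (by rw [hrucomp, hrvcomp, h])
  by_cases hdec : ru = rv
  · -- reject branch on both sides
    refine ⟨p2, comp, total, ?_, ?_, hlen2, hlenC,
      pvInj_congr n parent p2 comp (fun y hy0 hyn => (hiff2 y hy0 hyn).trans (hiff1 y hy0 hyn)) hInj,
      m, hP2⟩
    · simp only [pvStepA, heq1, heq2, hdec]
      simp
    · unfold pvStepB
      show (if PySem.List.pyGetD comp e.1 0 ≠ PySem.List.pyGetD comp e.2.1 0 then _ else _) = _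
      rw [if_neg (by simpa using hkey.1 hdec)]
  · -- accept branch
    have hci : ¬ (PySem.List.pyGetD comp e.1 0 = PySem.List.pyGetD comp e.2.1 0) :=
      fun h => hdec (hkey.2 h)
    obtain ⟨p3, ru', heq3, hlen3, hru'0, hru'n, hru'root2, hru'comp, _, hiff3, hnr3, hP3⟩ :=
      pvFind_spec n comp m (2 ^ n) p2 e.1 hlen2 hP2 hu0 hun (hfuel p2 m hP2 e.1 hu0 hun)
    obtain ⟨p4, rv', heq4, hlen4, hrv'0, hrv'n, hrv'root3, hrv'comp, _, hiff4, hnr4, hP4⟩ :=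
      pvFind_spec n comp m (2 ^ n) p3 e.2.1 hlen3 hP3 hv0 hvn (hfuel p3 m hP3 e.2.1 hv0 hvn)
    set ci := PySem.List.pyGetD comp e.1 0 with hci_def
    set cj := PySem.List.pyGetD comp e.2.1 0 with hcj_def
    have hcicj : ci ≠ cj := hci
    have hru'ci : PySem.List.pyGetD comp ru' 0 = ci := hru'comp
    have hrv'cj : PySem.List.pyGetD comp rv' 0 = cj := hrv'comp
    have hru'rv' : ru' ≠ rv' := by
      intro h; apply hcicj; rw [← hru'ci, ← hrv'cj, h]
    -- ru' is a root of p4 (and of parent); rv' is a root of p4 (and of parent)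
    have hru'root4 : PySem.List.pyGetD p4 ru' 0 = ru' :=
      (hiff4 ru' hru'0 hru'n).2 ((hiff3 ru' hru'0 hru'n).2 hru'root2)
    have hrv'root4 : PySem.List.pyGetD p4 rv' 0 = rv' := (hiff4 rv' hrv'0 hrv'n).2 hrv'root3
    have hru'rootP : PySem.List.pyGetD parent ru' 0 = ru' :=
      (hiff1 ru' hru'0 hru'n).1 ((hiff2 ru' hru'0 hru'n).1 hru'root2)
    have hrv'rootP : PySem.List.pyGetD parent rv' 0 = rv' :=
      (hiff1 rv' hrv'0 hrv'n).1 ((hiff2 rv' hrv'0 hrv'n).1 ((hiff3 rv' hrv'0 hrv'n).1 hrv'root3))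
    have hrootsP : ∀ y : Int, 0 ≤ y → y < (n : Int) →
        (PySem.List.pyGetD p4 y 0 = y ↔ PySem.List.pyGetD parent y 0 = y) := by
      intro y hy0 hyn
      exact ((hiff4 y hy0 hyn).trans ((hiff3 y hy0 hyn).trans (hiff2 y hy0 hyn))).trans (hiff1 y hy0 hyn)
    have hru'len : ru' < (p4.length : Int) := by rw [hlen4]; exact hru'n
    set p5 := PySem.List.pySetD p4 ru' rv' with hp5
    set fmap : Int → Int := fun c => if c = ci then cj else c with hfmap
    set comp' := comp.map fmap with hcomp'
    have hget5self : PySem.List.pyGetD p5 ru' 0 = rv' := pvGetSet_self p4 ru' rv' hru'0 hru'len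
    have hget5ne : ∀ y : Int, 0 ≤ y → y ≠ ru' → PySem.List.pyGetD p5 y 0 = PySem.List.pyGetD p4 y 0 :=
      fun y hy0 hyne => pvGetSet_ne p4 ru' y rv' hru'0 hru'len hy0 hyne
    have hgetc : ∀ z : Int, 0 ≤ z → z < (n : Int) →
        PySem.List.pyGetD comp' z 0 = fmap (PySem.List.pyGetD comp z 0) := by
      intro z hz0 hzn
      exact pvGet_map fmap comp z hz0 (by rw [hlenC]; exact hzn)
    -- number of non-roots grows by exactly one
    have hnr5 : pvNR n p5 = pvNR n p4 + 1 := by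
      have hset : (Finset.range n).filter (fun k : Nat => PySem.List.pyGetD p5 ((k : Int)) 0 ≠ ((k : Int)))
          = insert ru'.toNat ((Finset.range n).filter
              (fun k : Nat => PySem.List.pyGetD p4 ((k : Int)) 0 ≠ ((k : Int)))) := by
        ext k
        simp only [Finset.mem_filter, Finset.mem_insert, Finset.mem_range]
        by_cases hk : k = ru'.toNat
        · subst hk
          have hcast : ((ru'.toNat : Nat) : Int) = ru' := by omega
          constructor
          · intro _; exact Or.inl rfl
          · intro _
            refine ⟨by omega, ?_⟩
            rw [hcast, hget5self]
            exact fun h => hru'rv' h.symm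
        · have hne : ((k : Nat) : Int) ≠ ru' := by omega
          constructor
          · intro ⟨hk1, hk2⟩
            rw [hget5ne _ (by omega) hne] at hk2
            exact Or.inr ⟨hk1, hk2⟩
          · rintro (h | ⟨hk1, hk2⟩)
            · exact absurd h hk
            · rw [hget5ne _ (by omega) hne]
              exact ⟨hk1, hk2⟩
      unfold pvNR
      rw [hset, Finset.card_insert_of_notMem]
      simp only [Finset.mem_filter, Finset.mem_range, not_and, not_not]
      intro _
      have hcast : ((ru'.toNat : Nat) : Int) = ru' := by omega
      rw [hcast]; exact hru'root4
    have hpow : (2 : Nat) ^ (pvNR n p4 + 1) = 2 ^ pvNR n p4 + 2 ^ pvNR n p4 := by ring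
    set m' : Int → Nat := fun z => if PySem.List.pyGetD comp z 0 = ci then m z + (m rv' + 1) else m z
      with hm'
    have hm'rv' : m' rv' = m rv' := by simp only [hm', hrv'cj]; rw [if_neg (by exact fun h => hcicj h.symm)]
    have hm'ru' : m' ru' = m ru' + (m rv' + 1) := by simp [hm', hru'ci]
    refine ⟨p5, comp', total + e.2.2, ?_, ?_, by rw [hp5, PySem.List.length_pySetD]; exact hlen4,
      by rw [hcomp', List.length_map]; exact hlenC, ?_, m', ?_⟩
    · simp only [pvStepA, pvUnion, heq1, heq2, ne_eq, hdec, not_false_eq_true, if_true, heq3, heq4]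
      rw [hp5]
    · unfold pvStepB
      show (if PySem.List.pyGetD comp e.1 0 ≠ PySem.List.pyGetD comp e.2.1 0 then _ else _) = _
      rw [if_pos hci]
      rfl
    · -- pvInj for (p5, comp')
      intro x y hx0 hxn hy0 hyn hrx hry hcxy
      have hxne : x ≠ ru' := by
        intro h; rw [h, hget5self] at hrx; exact hru'rv' hrx.symm
      have hyne : y ≠ ru' := by
        intro h; rw [h, hget5self] at hry; exact hru'rv' hry.symm
      rw [hget5ne x hx0 hxne] at hrx
      rw [hget5ne y hy0 hyne] at hry
      have hrxP : PySem.List.pyGetD parent x 0 = x := (hrootsP x hx0 hxn).1 hrx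
      have hryP : PySem.List.pyGetD parent y 0 = y := (hrootsP y hy0 hyn).1 hry
      have hxci : PySem.List.pyGetD comp x 0 ≠ ci := by
        intro h
        exact hxne (hInj x ru' hx0 hxn hru'0 hru'n hrxP hru'rootP (by rw [h, hru'ci]))
      have hyci : PySem.List.pyGetD comp y 0 ≠ ci := by
        intro h
        exact hyne (hInj y ru' hy0 hyn hru'0 hru'n hryP hru'rootP (by rw [h, hru'ci]))
      rw [hgetc x hx0 hxn, hgetc y hy0 hyn] at hcxy
      simp only [hfmap, if_neg hxci, if_neg hyci] at hcxy
      exact hInj x y hx0 hxn hy0 hyn hrxP hryP hcxy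
    · -- pvInvP for (p5, comp', m')
      intro y hy0 hyn
      have hnr4P : pvNR n p5 = pvNR n p4 + 1 := hnr5
      by_cases hyru : y = ru'
      · subst hyru
        rw [hget5self]
        obtain ⟨_, _, _, hb4⟩ := hP4 y hy0 hyn
        obtain ⟨_, _, _, hbv4⟩ := hP4 rv' hrv'0 hrv'n
        refine ⟨⟨hrv'0, hrv'n⟩, ?_, Or.inr ?_, ?_⟩
        · rw [hgetc rv' hrv'0 hrv'n, hgetc y hy0 hyn, hrv'cj, hru'ci]
          simp only [hfmap, if_pos rfl]
          rw [if_neg (by exact fun h => hcicj h.symm)]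
        · rw [hm'rv', hm'ru']; omega
        · rw [hm'ru', hnr4P, hpow]; omega
      · rw [hget5ne y hy0 hyru]
        obtain ⟨⟨hpy0, hpyn⟩, hcy, hdy, hby⟩ := hP4 y hy0 hyn
        obtain ⟨_, _, _, hbpy⟩ := hP4 (PySem.List.pyGetD p4 y 0) hpy0 hpyn
        refine ⟨⟨hpy0, hpyn⟩, ?_, ?_, ?_⟩
        · rw [hgetc _ hpy0 hpyn, hgetc y hy0 hyn, hcy]
        · rcases hdy with h | h
          · exact Or.inl h
          · refine Or.inr ?_
            simp only [hm', hcy]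
            split_ifs <;> omega
        · simp only [hm']
          obtain ⟨_, _, _, hbrv'⟩ := hP4 rv' hrv'0 hrv'n
          rw [hnr4P, hpow]
          split_ifs <;> omega

theorem pvLoop_sim (n : Nat) (L : List (Int × Int × Int)) :
    ∀ (parent comp : List Int) (total : Int), pvInv n parent comp →
    (∀ e ∈ L, 0 ≤ e.1 ∧ e.1 < (n : Int) ∧ 0 ≤ e.2.1 ∧ e.2.1 < (n : Int)) →
    (L.foldl (pvStepA (2 ^ n)) (parent, total)).2
      = ((L.map pvRot).foldl pvStepB (comp, total)).2 := by
  induction L with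
  | nil => intro parent comp total _ _; rfl
  | cons e L ih =>
    intro parent comp total hInv hL
    obtain ⟨p', c', t', hA, hB, hInv'⟩ :=
      pvStep_sim n parent comp total e (hL e List.mem_cons_self) hInv
    simp only [List.map_cons, List.foldl_cons, hA, hB]
    exact ih p' c' t' hInv' (fun e' he' => hL e' (List.mem_cons_of_mem e he'))

theorem pvInv_init (n : Nat) :
    pvInv n (PySem.List.pyRange 0 (n : Int)) (PySem.List.pyRange 0 (n : Int)) := by
  have hlen : (PySem.List.pyRange 0 (n : Int)).length = n := by
    rw [PySem.List.length_pyRange_one]; omega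
  have hget : ∀ x : Int, 0 ≤ x → x < (n : Int) →
      PySem.List.pyGetD (PySem.List.pyRange 0 (n : Int)) x 0 = x :=
    fun x hx0 hxn => pvGet_range (n : Int) x hx0 hxn
  have hnr0 : pvNR n (PySem.List.pyRange 0 (n : Int)) = 0 := by
    unfold pvNR
    rw [Finset.card_eq_zero]
    apply Finset.filter_eq_empty_iff.2
    intro k hk
    simp only [Finset.mem_range] at hk
    simp only [not_not]
    exact hget (k : Int) (by omega) (by exact_mod_cast hk)
  refine ⟨hlen, hlen, ?_, fun _ => 0, ?_⟩
  · intro x y hx0 hxn hy0 hyn _ _ hc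
    rw [hget x hx0 hxn, hget y hy0 hyn] at hc
    exact hc
  · intro x hx0 hxn
    refine ⟨by rw [hget x hx0 hxn]; exact ⟨hx0, hxn⟩,
      by rw [hget x hx0 hxn]; exact hget x hx0 hxn,
      Or.inl (hget x hx0 hxn), by rw [hnr0]; norm_num⟩

theorem pvEdgesA_eq (pts : List (Int × Int)) : pvEdgesA pts = List.flatMap (fun i =>
    List.map (fun j => (i, j, pvCheb (PySem.List.pyGetD pts i (0, 0)) (PySem.List.pyGetD pts j (0, 0))))
      (PySem.List.pyRange (i + 1) (pts.length : Int))) (PySem.List.pyRange 0 (pts.length : Int)) := by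
  unfold pvEdgesA
  simp only [PySem.List.foldl_append_singleton_eq_map]
  rw [PySem.List.foldl_append_eq_flatMap]
  simp

theorem pvEdgesA_bounds (pts : List (Int × Int)) :
    ∀ e ∈ pvEdgesA pts, 0 ≤ e.1 ∧ e.1 < (pts.length : Int) ∧ 0 ≤ e.2.1 ∧ e.2.1 < (pts.length : Int) := by
  intro e he
  rw [pvEdgesA_eq, List.mem_flatMap] at he
  obtain ⟨i, hi, he⟩ := he
  rw [List.mem_map] at he
  obtain ⟨j, hj, rfl⟩ := he
  rw [PySem.List.mem_pyRange_one] at hi hj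
  show 0 ≤ i ∧ i < (pts.length : Int) ∧ 0 ≤ j ∧ j < (pts.length : Int)
  omega

theorem pv_final (waypoints : List (Int × Int)) :
    calculate_mst_length waypoints = calculate_mst_length_alt waypoints := by
  unfold calculate_mst_length calculate_mst_length_alt
  have hrot : PySem.List.sorted (pvEdgesB waypoints) (fun e => e.1)
      = (PySem.List.sorted (pvEdgesA waypoints) (fun x => x.2.2)).map pvRot := by
    rw [pvEdgesB_eq_map, pvSorted_map_comm]
    rfl
  rw [hrot]
  exact pvLoop_sim waypoints.length (PySem.List.sorted (pvEdgesA waypoints) (fun x => x.2.2))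
    _ _ 0 (pvInv_init waypoints.length)
    (fun e he => pvEdgesA_bounds waypoints e ((PySem.List.mem_sorted _ _ _ e).1 he))

-- ===== VERDICT (by name: the statement is the Claim_ definition above) =====
theorem calculate_mst_length_spec : Claim_equal_calculate_mst_length := by
  intro waypoints _
  unfold Spec_calculate_mst_length
  exact pv_final waypoints
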